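-- pv_equiv track=rewrite | github.com/ahdavies6/NLP_QA | src/text_analyzer.py | get_to_phrases
-- ===== SOURCE A (Python) =====
-- def restring(sentence):
--     result = []
--     for word in sentence:
--         result.append(word[0])
--
--     return ' '.join(result)
--
-- def get_to_phrases(tagged_sentence):
--     x_phrases = []
--     x_words = []
--     for word in tagged_sentence:
--         if len(x_words) == 0:
--             if word[1] == 'TO':
--                 x_words.append(word)
--         elif word[1] == 'VB':
--             x_words.append(word)
--         else:
--             if len(x_words) > 1:
--                 x_phrases.append(restring(x_words))
--             x_words.clear()
--     if len(x_words) > 1: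
--         x_phrases.append(restring(x_words))
--         x_words.clear()
--
--     return x_phrases
-- ===== SOURCE B (Python) =====
-- def get_to_phrases(tagged_sentence):
--     phrases = []
--     i, n = 0, len(tagged_sentence)
--     while i < n:
--         if tagged_sentence[i][1] == 'TO':
--             j = i + 1
--             while j < n and tagged_sentence[j][1] == 'VB':
--                 j += 1
--             if j - i > 1:
--                 phrases.append(' '.join(w[0] for w in tagged_sentence[i:j]))
--             i = j + 1  # the word that ends a run is consumed, as in the original
--         else:
--             i += 1
--     return phrases
-- ===== Notes on version B (the rewrite author's own statement) =====
-- stated objective: alternative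
-- what changed: Replaced the running-buffer state machine (buffer + flush-on-terminator + final flush) with an anchor scan: find a 'TO' word, greedily take the following 'VB' run, emit it if longer than one, and consume the terminating word.
import Mathlib
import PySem

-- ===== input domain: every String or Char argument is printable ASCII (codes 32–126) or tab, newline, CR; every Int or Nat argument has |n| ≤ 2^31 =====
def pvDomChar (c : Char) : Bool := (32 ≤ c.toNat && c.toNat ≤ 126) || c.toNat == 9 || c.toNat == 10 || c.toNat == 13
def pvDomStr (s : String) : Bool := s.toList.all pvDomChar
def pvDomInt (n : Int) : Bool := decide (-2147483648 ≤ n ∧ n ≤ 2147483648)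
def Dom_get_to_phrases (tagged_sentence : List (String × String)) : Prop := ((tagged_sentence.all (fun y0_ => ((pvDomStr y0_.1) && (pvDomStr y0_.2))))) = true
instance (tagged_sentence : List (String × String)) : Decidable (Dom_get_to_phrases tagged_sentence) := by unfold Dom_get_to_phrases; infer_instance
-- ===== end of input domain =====

-- B replaces A's running-buffer state machine by an anchor scan (find a 'TO', take the
-- following 'VB' run, consume the terminating word); same return value, similar cost.

-- ===== PORT A =====
-- A's helper restring: append each word[0] to a list, then ' '.join it
def restringA (sentence : List (String × String)) : String :=
  let result := sentence.foldl (fun r word => r ++ [word.1]) []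
  PySem.Str.join " " result

-- the body of A's for-loop, as a fold step over the state (x_phrases, x_words)
def aStep (st : List String × List (String × String)) (word : String × String) :
    List String × List (String × String) :=
  if st.2.length == 0 then
    (if word.2 == "TO" then (st.1, st.2 ++ [word]) else st)
  else if word.2 == "VB" then (st.1, st.2 ++ [word])
  else if st.2.length > 1 then (st.1 ++ [restringA st.2], [])
  else (st.1, [])

def get_to_phrases (tagged_sentence : List (String × String)) : List String :=
  let st := tagged_sentence.foldl aStep ([], [])
  if st.2.length > 1 then st.1 ++ [restringA st.2] else st.1

-- ===== PORT B =====
-- Source B's ' '.join(x[0] for x in run)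
def joinWordsB (run : List (String × String)) : String :=
  PySem.Str.join " " (run.map (·.1))

-- Source B's outer while-loop, recursing on the suffix of the list from index i; the inner
-- while-loop advancing j over the 'VB' run is takeWhile/dropWhile, and `.drop 1` is `i = j + 1`
def altGo : List (String × String) → List String
  | [] => []
  | w :: rest =>
    if w.2 == "TO" then
      let run := w :: rest.takeWhile (fun x => x.2 == "VB")
      (if run.length > 1 then [joinWordsB run] else []) ++
        altGo ((rest.dropWhile (fun x => x.2 == "VB")).drop 1)
    else altGo rest
termination_by l => l.length
decreasing_by
  · have h := List.length_dropWhile_le (p := fun x : String × String => x.2 == "VB") (l := rest)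
    simp only [List.length_cons, List.length_drop]; omega
  · simp

def get_to_phrases_alt (tagged_sentence : List (String × String)) : List String :=
  altGo tagged_sentence

-- ===== PRECONDITION & SPEC =====
def Spec_get_to_phrases (tagged_sentence : List (String × String)) (out : List String) : Prop := out = get_to_phrases_alt tagged_sentence
instance (tagged_sentence : List (String × String)) (out : List String) : Decidable (Spec_get_to_phrases tagged_sentence out) := by unfold Spec_get_to_phrases; infer_instance

-- ===== CLAIM (what is proved, stated in full; the proofs are below) =====
def Claim_equal_get_to_phrases : Prop := ∀ (tagged_sentence : List (String × String)), Dom_get_to_phrases tagged_sentence → Spec_get_to_phrases tagged_sentence (get_to_phrases tagged_sentence)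

-- ===== LEMMAS AND PROOFS =====

-- A's final flush of the loop state
def aFinal (st : List String × List (String × String)) : List String :=
  if st.2.length > 1 then st.1 ++ [restringA st.2] else st.1

-- B's continuation when A's buffer already holds ws (head 'TO', rest 'VB's)
def contGo (ws l : List (String × String)) : List String :=
  let run := ws ++ l.takeWhile (fun x => x.2 == "VB")
  (if run.length > 1 then [joinWordsB run] else []) ++
    altGo ((l.dropWhile (fun x => x.2 == "VB")).drop 1)

theorem restringA_eq (ws : List (String × String)) : restringA ws = joinWordsB ws := by
  have aux : ∀ (acc : List String),
      ws.foldl (fun r word => r ++ [word.1]) acc = acc ++ ws.map (·.1) := by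
    induction ws with
    | nil => simp
    | cons w t ih => intro acc; simp [List.foldl_cons, ih]
  simp [restringA, joinWordsB, aux []]

theorem main_lemma : ∀ (n : ℕ) (l : List (String × String)), l.length ≤ n →
    (∀ ph, aFinal (l.foldl aStep (ph, [])) = ph ++ altGo l) ∧
    (∀ ph ws, ws ≠ [] → aFinal (l.foldl aStep (ph, ws)) = ph ++ contGo ws l) := by
  intro n
  induction n with
  | zero =>
    intro l hl
    have : l = [] := List.eq_nil_of_length_eq_zero (Nat.le_zero.mp hl)
    subst this
    constructor
    · intro ph; simp [aFinal, altGo]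
    · intro ph ws _; simp only [List.foldl_nil, contGo, List.takeWhile_nil, List.dropWhile_nil,
        List.append_nil, List.drop_nil, altGo, aFinal]
      split_ifs with h <;> simp [restringA_eq]
  | succ n ih =>
    intro l hl
    cases l with
    | nil =>
      constructor
      · intro ph; simp [aFinal, altGo]
      · intro ph ws _; simp only [List.foldl_nil, contGo, List.takeWhile_nil, List.dropWhile_nil,
          List.append_nil, List.drop_nil, altGo, aFinal]
        split_ifs with h <;> simp [restringA_eq]
    | cons w t =>
      have ht : t.length ≤ n := by simp at hl; omega
      constructor
      · intro ph
        by_cases hTO : w.2 == "TO"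
        · have : aStep (ph, []) w = (ph, [w]) := by simp [aStep, hTO]
          rw [List.foldl_cons, this, (ih t ht).2 ph [w] (by simp)]
          simp only [altGo, hTO, if_pos, contGo, List.singleton_append]
        · have : aStep (ph, []) w = (ph, []) := by simp [aStep, hTO]
          rw [List.foldl_cons, this, (ih t ht).1 ph]
          simp only [altGo, hTO]; simp
      · intro ph ws hws
        cases ws with
        | nil => exact absurd rfl hws
        | cons v vs =>
          by_cases hVB : w.2 == "VB"
          · have hstep : aStep (ph, v :: vs) w = (ph, (v :: vs) ++ [w]) := by
              simp [aStep, hVB]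
            rw [List.foldl_cons, hstep, (ih t ht).2 ph ((v :: vs) ++ [w]) (by simp)]
            simp only [contGo, List.takeWhile_cons, hVB, if_pos, List.dropWhile_cons, List.append_assoc,
              List.singleton_append]
          · have hstep : aStep (ph, v :: vs) w =
                (ph ++ (if (v :: vs).length > 1 then [restringA (v :: vs)] else []), []) := by
              simp only [aStep]
              split_ifs with h0 h1 h2 <;> simp_all
            rw [List.foldl_cons, hstep, (ih t ht).1 _]
            have hTW : List.takeWhile (fun x : String × String => x.2 == "VB") (w :: t) = [] := by
              simp [hVB]
            have hDW : List.dropWhile (fun x : String × String => x.2 == "VB") (w :: t) = w :: t := by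
              simp [hVB]
            simp only [contGo, hTW, hDW, List.append_nil, List.drop_succ_cons, List.drop_zero]
            split_ifs with h <;> simp [restringA_eq, List.append_assoc]

-- ===== VERDICT (by name: the statement is the Claim_ definition above) =====
theorem get_to_phrases_spec : Claim_equal_get_to_phrases := by
  intro ts _
  show get_to_phrases ts = get_to_phrases_alt ts
  have := (main_lemma ts.length ts le_rfl).1 []
  simpa [get_to_phrases, aFinal, get_to_phrases_alt] using this
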